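-- pv_equiv track=rewrite | github.com/nerdsane/deep-sci-fi | src/co_scientist/co_scientist.py | format_evolution_results
-- ===== SOURCE A (Python) =====
-- def format_evolution_results(evolved_scenarios: list) -> str:
--     """Format evolution results for markdown output."""
--     content = "# Co-Scientist Evolution Results\n\n"
--     content += f"**Total Evolution Attempts:** {len(evolved_scenarios)}\n\n"
--
--     if not evolved_scenarios:
--         content += "No evolution attempts were made - likely due to earlier phase failures.\n\n"
--         return content
--
--     # Group by strategy
--     by_strategy = {}
--     for evolution in evolved_scenarios:
--         strategy = evolution.get("strategy", "Unknown")
--         if strategy not in by_strategy: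
--             by_strategy[strategy] = []
--         by_strategy[strategy].append(evolution)
--
--     for strategy, strategy_evolutions in by_strategy.items():
--         content += f"## {strategy.title()} Evolution ({len(strategy_evolutions)} attempts)\n\n"
--
--         for evolution in strategy_evolutions:
--             original_direction = evolution.get("original_direction", "Unknown")
--             content += f"### {original_direction} - {strategy.title()}\n"
--
--             evolved_content = evolution.get('evolved_content', 'No content')
--             # Truncate for readability
--             if len(evolved_content) > 800:
--                 content += evolved_content[:800] + "...\n\n"
--             else:
--                 content += evolved_content + "\n\n"
--             content += "---\n\n"
--
--     return content
-- ===== SOURCE B (Python) =====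
-- def _block(evolution, strategy):
--     original_direction = evolution.get("original_direction", "Unknown")
--     evolved_content = evolution.get("evolved_content", "No content")
--     body = evolved_content[:800] + "..." if len(evolved_content) > 800 else evolved_content
--     return f"### {original_direction} - {strategy.title()}\n{body}\n\n---\n\n"
--
--
-- def format_evolution_results(evolved_scenarios: list) -> str:
--     """Format evolution results for markdown output."""
--     content = "# Co-Scientist Evolution Results\n\n"
--     content += f"**Total Evolution Attempts:** {len(evolved_scenarios)}\n\n"
--     if not evolved_scenarios:
--         return content + "No evolution attempts were made - likely due to earlier phase failures.\n\n"
--     # distinct strategies in first-appearance order, without storing grouped lists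
--     seen = []
--     for evolution in evolved_scenarios:
--         s = evolution.get("strategy", "Unknown")
--         if s not in seen:
--             seen.append(s)
--     for strategy in seen:
--         matching = [e for e in evolved_scenarios if e.get("strategy", "Unknown") == strategy]
--         content += f"## {strategy.title()} Evolution ({len(matching)} attempts)\n\n"
--         for evolution in matching:
--             content += _block(evolution, strategy)
--     return content
-- ===== Notes on version B (the rewrite author's own statement) =====
-- stated objective: alternative
-- what changed: Replaces the dict-of-lists grouping with a two-pass scheme: one pass collects the distinct strategies in first-appearance order, then each strategy's block is produced by filtering the original list, with each scenario block built by a pure helper function instead of in-place accumulation.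
import Mathlib
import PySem

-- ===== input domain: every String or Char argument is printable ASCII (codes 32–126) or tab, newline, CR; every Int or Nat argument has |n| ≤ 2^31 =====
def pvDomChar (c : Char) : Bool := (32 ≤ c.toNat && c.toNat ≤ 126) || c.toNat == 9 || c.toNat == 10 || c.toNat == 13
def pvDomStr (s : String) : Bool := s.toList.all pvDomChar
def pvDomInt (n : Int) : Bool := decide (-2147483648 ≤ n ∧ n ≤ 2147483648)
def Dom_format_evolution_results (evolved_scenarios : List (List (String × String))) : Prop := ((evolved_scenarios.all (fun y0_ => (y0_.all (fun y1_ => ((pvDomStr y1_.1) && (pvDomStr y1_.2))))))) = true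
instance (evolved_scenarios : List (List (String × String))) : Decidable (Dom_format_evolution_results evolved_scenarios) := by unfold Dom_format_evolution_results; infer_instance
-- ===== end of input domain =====

-- B groups by two passes (distinct strategies in first-appearance order, then a filter per strategy,
-- each scenario block built by a pure helper) instead of A's dict-of-lists; same output, alternative decomposition.

-- shared primitive: dict.get(k, dflt) on an association list (first match)
def pyGetKey (ev : List (String × String)) (k dflt : String) : String :=
  (PySem.Dict.mk ev).getD k dflt

-- shared primitive: str.title(), exact on the ASCII domain (a letter after a non-letter is
-- uppercased, any other letter lowercased)
def pyTitleGo : Bool → List Char → List Char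
  | _, [] => []
  | prev, c :: cs =>
    if PySem.Chars.isalpha c then
      (if prev then PySem.Chars.lowerChar c else PySem.Chars.upperChar c) :: pyTitleGo true cs
    else
      c :: pyTitleGo false cs

def pyTitle (s : String) : String := String.ofList (pyTitleGo false s.toList)

-- ===== PORT A =====
def format_evolution_results (evolved_scenarios : List (List (String × String))) : String :=
  let content := "# Co-Scientist Evolution Results\n\n"
  let content := content ++ "**Total Evolution Attempts:** " ++ PySem.Int.toStr (PySem.List.len evolved_scenarios) ++ "\n\n"
  if evolved_scenarios.isEmpty then
    content ++ "No evolution attempts were made - likely due to earlier phase failures.\n\n"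
  else
    let by_strategy : PySem.Dict String (List (List (String × String))) :=
      evolved_scenarios.foldl (fun d evolution =>
        let strategy := pyGetKey evolution "strategy" "Unknown"
        let d := if d.contains strategy then d else d.insert strategy []
        d.modify strategy [] (fun l => l ++ [evolution])) PySem.Dict.empty
    by_strategy.items.foldl (fun content p =>
      let strategy := p.1
      let strategy_evolutions := p.2
      let content := content ++ "## " ++ pyTitle strategy ++ " Evolution (" ++ PySem.Int.toStr (PySem.List.len strategy_evolutions) ++ " attempts)\n\n"
      let content := strategy_evolutions.foldl (fun content evolution =>
        let original_direction := pyGetKey evolution "original_direction" "Unknown"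
        let content := content ++ "### " ++ original_direction ++ " - " ++ pyTitle strategy ++ "\n"
        let content :=
          let evolved_content := pyGetKey evolution "evolved_content" "No content"
          if PySem.Str.len evolved_content > 800 then
            content ++ PySem.Str.slice evolved_content none (some 800) ++ "...\n\n"
          else
            content ++ evolved_content ++ "\n\n"
        content ++ "---\n\n") content
      content) content

-- ===== PORT B =====
def pvBlock (evolution : List (String × String)) (strategy : String) : String :=
  let original_direction := pyGetKey evolution "original_direction" "Unknown"
  let evolved_content := pyGetKey evolution "evolved_content" "No content"
  let body :=
    if PySem.Str.len evolved_content > 800 then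
      PySem.Str.slice evolved_content none (some 800) ++ "..."
    else
      evolved_content
  "### " ++ original_direction ++ " - " ++ pyTitle strategy ++ "\n" ++ body ++ "\n\n---\n\n"

def format_evolution_results_alt (evolved_scenarios : List (List (String × String))) : String :=
  let content := "# Co-Scientist Evolution Results\n\n"
  let content := content ++ "**Total Evolution Attempts:** " ++ PySem.Int.toStr (PySem.List.len evolved_scenarios) ++ "\n\n"
  if evolved_scenarios.isEmpty then
    content ++ "No evolution attempts were made - likely due to earlier phase failures.\n\n"
  else
    let seen : List String :=
      evolved_scenarios.foldl (fun seen evolution =>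
        let s := pyGetKey evolution "strategy" "Unknown"
        if seen.contains s then seen else seen ++ [s]) []
    seen.foldl (fun content strategy =>
      let matching := evolved_scenarios.filter (fun e => pyGetKey e "strategy" "Unknown" == strategy)
      let content := content ++ "## " ++ pyTitle strategy ++ " Evolution (" ++ PySem.Int.toStr (PySem.List.len matching) ++ " attempts)\n\n"
      matching.foldl (fun content evolution => content ++ pvBlock evolution strategy) content) content

-- ===== PRECONDITION & SPEC =====
def Spec_format_evolution_results (evolved_scenarios : List (List (String × String))) (out : String) : Prop := out = format_evolution_results_alt evolved_scenarios
instance (evolved_scenarios : List (List (String × String))) (out : String) : Decidable (Spec_format_evolution_results evolved_scenarios out) := by unfold Spec_format_evolution_results; infer_instance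

-- ===== CLAIM (what is proved, stated in full; the proofs are below) =====
def Claim_equal_format_evolution_results : Prop := ∀ (evolved_scenarios : List (List (String × String))), Dom_format_evolution_results evolved_scenarios → Spec_format_evolution_results evolved_scenarios (format_evolution_results evolved_scenarios)

-- ===== LEMMAS AND PROOFS =====

-- the grouping step of A, named for the lemmas below
def pvStep (d : PySem.Dict String (List (List (String × String)))) (evolution : List (String × String)) :
    PySem.Dict String (List (List (String × String))) :=
  let strategy := pyGetKey evolution "strategy" "Unknown"
  let d := if d.contains strategy then d else d.insert strategy []
  d.modify strategy [] (fun l => l ++ [evolution])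

lemma pvStep_keys (d : PySem.Dict String (List (List (String × String)))) (ev : List (String × String)) :
    (pvStep d ev).keys =
      (if d.keys.contains (pyGetKey ev "strategy" "Unknown") then d.keys
       else d.keys ++ [pyGetKey ev "strategy" "Unknown"]) := by
  unfold pvStep
  set s := pyGetKey ev "strategy" "Unknown" with hs
  by_cases h : d.contains s = true
  · simp only [h, if_pos]
    rw [PySem.Dict.keys_modify, PySem.Dict.keys_insert_of_contains _ _ h]
    rw [PySem.Dict.contains_iff_mem_keys] at h
    simp [h]
  · have h' : d.contains s = false := by simpa using h
    simp only [h', Bool.false_eq_true, if_false]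
    rw [PySem.Dict.keys_modify,
        PySem.Dict.keys_insert_of_contains _ _ (PySem.Dict.contains_insert_self d s []),
        PySem.Dict.keys_insert_of_not_contains _ _ h']
    have : ¬ s ∈ d.keys := by
      rw [← PySem.Dict.contains_iff_mem_keys]; simp [h']
    simp [this]

lemma pvStep_getD (d : PySem.Dict String (List (List (String × String)))) (ev : List (String × String)) (c : String) :
    (pvStep d ev).getD c [] =
      (if c = pyGetKey ev "strategy" "Unknown" then d.getD c [] ++ [ev] else d.getD c []) := by
  unfold pvStep
  set s := pyGetKey ev "strategy" "Unknown" with hs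
  by_cases h : d.contains s = true
  · simp only [h, if_true, PySem.Dict.getD_modify]
    split_ifs with hcs
    · subst hcs; rfl
    · rfl
  · have h' : d.contains s = false := by simpa using h
    simp only [h', Bool.false_eq_true, if_false]
    rw [PySem.Dict.getD_modify]
    by_cases hc : c = s
    · subst hc
      simp [PySem.Dict.getD_of_not_contains d _ h']
    · simp [hc, PySem.Dict.getD_insert]

lemma pvFold_keys (l : List (List (String × String))) (d : PySem.Dict String (List (List (String × String)))) :
    (l.foldl pvStep d).keys =
      l.foldl (fun seen ev =>
        let s := pyGetKey ev "strategy" "Unknown"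
        if seen.contains s then seen else seen ++ [s]) d.keys := by
  induction l generalizing d with
  | nil => rfl
  | cons ev l ih =>
    simp only [List.foldl_cons]
    rw [ih, pvStep_keys]

lemma pvSeen_nodup (l : List (List (String × String))) (seen : List String) (h : seen.Nodup) :
    (l.foldl (fun seen ev =>
        let s := pyGetKey ev "strategy" "Unknown"
        if seen.contains s then seen else seen ++ [s]) seen).Nodup := by
  induction l generalizing seen with
  | nil => exact h
  | cons ev l ih =>
    simp only [List.foldl_cons]
    apply ih
    by_cases hc : pyGetKey ev "strategy" "Unknown" ∈ seen
    · simpa [hc] using h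
    · have hno : seen.contains (pyGetKey ev "strategy" "Unknown") = false := by
        simpa using hc
      simp only [hno, Bool.false_eq_true, if_false]
      refine List.Nodup.append h (by simp) ?_
      intro a ha hb
      simp only [List.mem_singleton] at hb
      exact hc (hb ▸ ha)

lemma pvFold_getD (l : List (List (String × String))) (d : PySem.Dict String (List (List (String × String)))) (c : String) :
    (l.foldl pvStep d).getD c [] =
      d.getD c [] ++ l.filter (fun ev => pyGetKey ev "strategy" "Unknown" == c) := by
  induction l generalizing d with
  | nil => simp
  | cons ev l ih =>
    simp only [List.foldl_cons, List.filter_cons]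
    rw [ih, pvStep_getD]
    by_cases hc : c = pyGetKey ev "strategy" "Unknown"
    · subst hc
      simp only [beq_self_eq_true, if_true, List.append_assoc, List.singleton_append]
    · have hbc : ¬ (pyGetKey ev "strategy" "Unknown" == c) = true := by
        simp only [beq_iff_eq]
        exact fun h => hc h.symm
      rw [if_neg hc, if_neg hbc]

-- proof-only names for the loop bodies of the two ports (definitionally equal to the inline lambdas)
def pvAInner (strategy content : String) (evolution : List (String × String)) : String :=
  let original_direction := pyGetKey evolution "original_direction" "Unknown"
  let content := content ++ "### " ++ original_direction ++ " - " ++ pyTitle strategy ++ "\n"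
  let content :=
    let evolved_content := pyGetKey evolution "evolved_content" "No content"
    if PySem.Str.len evolved_content > 800 then
      content ++ PySem.Str.slice evolved_content none (some 800) ++ "...\n\n"
    else
      content ++ evolved_content ++ "\n\n"
  content ++ "---\n\n"

def pvAOuter (content : String) (p : String × List (List (String × String))) : String :=
  let strategy := p.1
  let strategy_evolutions := p.2
  let content := content ++ "## " ++ pyTitle strategy ++ " Evolution (" ++ PySem.Int.toStr (PySem.List.len strategy_evolutions) ++ " attempts)\n\n"
  strategy_evolutions.foldl (pvAInner strategy) content

def pvSeenStep (seen : List String) (ev : List (String × String)) : List String :=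
  let s := pyGetKey ev "strategy" "Unknown"
  if seen.contains s then seen else seen ++ [s]

def pvBOuter (es : List (List (String × String))) (content strategy : String) : String :=
  let matching := es.filter (fun e => pyGetKey e "strategy" "Unknown" == strategy)
  let content := content ++ "## " ++ pyTitle strategy ++ " Evolution (" ++ PySem.Int.toStr (PySem.List.len matching) ++ " attempts)\n\n"
  matching.foldl (fun content evolution => content ++ pvBlock evolution strategy) content

lemma pvInner_eq (s c : String) (ev : List (String × String)) :
    pvAInner s c ev = c ++ pvBlock ev s := by
  unfold pvAInner pvBlock
  by_cases h : PySem.Str.len (pyGetKey ev "evolved_content" "No content") > 800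
  · simp only [h, if_true, String.append_assoc]
    rfl
  · simp only [h, if_false, String.append_assoc]
    rfl

lemma pv_main (es : List (List (String × String))) (c0 : String) :
    (es.foldl pvStep PySem.Dict.empty).items.foldl pvAOuter c0 =
      (es.foldl pvSeenStep []).foldl (pvBOuter es) c0 := by
  have hk : (es.foldl pvStep PySem.Dict.empty).keys = es.foldl pvSeenStep [] := by
    rw [pvFold_keys]; rfl
  have hnd : (es.foldl pvStep PySem.Dict.empty).keys.Nodup := by
    rw [hk]; exact pvSeen_nodup es [] List.nodup_nil
  rw [PySem.Dict.items_eq_map_keys _ hnd [], List.foldl_map, hk]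
  have hfun : (fun (c : String) (k : String) =>
      pvAOuter c (k, (es.foldl pvStep PySem.Dict.empty).getD k [])) = pvBOuter es := by
    funext c k
    unfold pvAOuter pvBOuter
    rw [pvFold_getD]
    have hempty : (PySem.Dict.empty : PySem.Dict String (List (List (String × String)))).getD k [] = [] := rfl
    rw [hempty]
    simp only [List.nil_append]
    rw [show pvAInner k = (fun (c : String) (e : List (String × String)) => c ++ pvBlock e k)
          from funext fun c => funext fun e => pvInner_eq k c e]
  rw [hfun]

-- ===== VERDICT (by name: the statement is the Claim_ definition above) =====
theorem format_evolution_results_spec : Claim_equal_format_evolution_results := by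
  intro es _
  show format_evolution_results es = format_evolution_results_alt es
  unfold format_evolution_results format_evolution_results_alt
  by_cases he : es.isEmpty = true
  · simp only [he, if_true]
  · simp only [he, Bool.false_eq_true, if_false]
    exact pv_main es _
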